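-- pv_equiv track=rewrite | github.com/pypi-data/pypi-mirror-96 | packages/sonicprobe/sonicprobe-0.3.40-py2-none-any.whl/sonicprobe/helpers.py | re_unescape
-- ===== SOURCE A (Python) =====
-- ALPHANUM       = frozenset(
--     "abcdefghijklmnopqrstuvwxyzABCDEFGHIJKLMNOPQRSTUVWXYZ0123456789")
--
-- def re_unescape(pattern):
--     s           = []
--     alphanum    = ALPHANUM
--     backslash   = False
--
--     for c in pattern:
--         if c in alphanum:
--             s.append(c)
--         elif c == "\\":
--             if backslash:
--                 s.append(c)
--             else:
--                 backslash = True
--                 continue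
--         else:
--             s.append(c)
--         backslash = False
--     return ''.join(s)
-- ===== SOURCE B (Python) =====
-- def re_unescape(pattern):
--     out = []
--     i = 0
--     n = len(pattern)
--     while i < n:
--         c = pattern[i]
--         if c == "\\":
--             i += 1
--             if i < n:
--                 out.append(pattern[i])
--                 i += 1
--         else:
--             out.append(c)
--             i += 1
--     return ''.join(out)
-- ===== Notes on version B (the rewrite author's own statement) =====
-- stated objective: simpler
-- what changed: Replaces the boolean backslash-flag state machine (and the ALPHANUM membership test, which never affects the output) with an index-based scan that consumes a backslash and its escaped character as a pair.
import Mathlib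
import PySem

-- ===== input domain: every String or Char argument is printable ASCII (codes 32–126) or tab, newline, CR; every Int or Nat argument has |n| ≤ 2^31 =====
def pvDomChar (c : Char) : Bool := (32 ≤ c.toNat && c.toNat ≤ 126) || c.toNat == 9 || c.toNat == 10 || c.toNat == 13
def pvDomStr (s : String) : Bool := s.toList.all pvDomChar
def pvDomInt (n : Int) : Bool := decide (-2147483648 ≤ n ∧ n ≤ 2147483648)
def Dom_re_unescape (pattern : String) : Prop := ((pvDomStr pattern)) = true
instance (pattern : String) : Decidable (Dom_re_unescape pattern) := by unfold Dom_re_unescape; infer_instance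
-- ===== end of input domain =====

-- B replaces the backslash-flag state machine (whose ALPHANUM test never affects the output)
-- with a pair-consuming index scan; objective: simpler. Same result on every input.

-- ===== PORT A =====
-- ALPHANUM frozenset, as the list of its distinct characters
def pvAlphanum : List Char :=
  "abcdefghijklmnopqrstuvwxyzABCDEFGHIJKLMNOPQRSTUVWXYZ0123456789".toList

-- one step of A's for-loop over state (s, backslash)
def pvStepA (st : List Char × Bool) (c : Char) : List Char × Bool :=
  if c ∈ pvAlphanum then (st.1 ++ [c], false)
  else if c = '\\' then
    (if st.2 then (st.1 ++ [c], false) else (st.1, true))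
  else (st.1 ++ [c], false)

def re_unescape (pattern : String) : String :=
  String.mk (pattern.toList.foldl pvStepA ([], false)).1

-- ===== PORT B =====
-- Source B's while loop: recursion on the remaining characters, consuming pairs at a backslash
def pvScanB : List Char → List Char
  | [] => []
  | c :: rest =>
    if c = '\\' then
      match rest with
      | [] => []
      | d :: rest' => d :: pvScanB rest'
    else c :: pvScanB rest

def re_unescape_alt (pattern : String) : String :=
  String.mk (pvScanB pattern.toList)

-- ===== PRECONDITION & SPEC =====
def Spec_re_unescape (pattern : String) (out : String) : Prop := out = re_unescape_alt pattern
instance (pattern : String) (out : String) : Decidable (Spec_re_unescape pattern out) := by unfold Spec_re_unescape; infer_instance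

-- ===== CLAIM (what is proved, stated in full; the proofs are below) =====
def Claim_equal_re_unescape : Prop := ∀ (pattern : String), Dom_re_unescape pattern → Spec_re_unescape pattern (re_unescape pattern)

-- ===== LEMMAS AND PROOFS =====

theorem pvScanB_cons_ne {c : Char} {rest : List Char} (h : ¬ c = '\\') :
    pvScanB (c :: rest) = c :: pvScanB rest := by
  conv_lhs => rw [pvScanB.eq_def]
  simp [h]

theorem pvScanB_cons_bs (rest : List Char) :
    pvScanB ('\\' :: rest) =
      (match rest with | [] => [] | d :: r => d :: pvScanB r) := by
  conv_lhs => rw [pvScanB.eq_def]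
  simp

theorem pvStepA_false_ne {acc : List Char} {c : Char} (hb : ¬ c = '\\') :
    pvStepA (acc, false) c = (acc ++ [c], false) := by
  simp only [pvStepA, if_neg hb]
  split_ifs <;> rfl

theorem pvStepA_false_bs (acc : List Char) :
    pvStepA (acc, false) '\\' = (acc, true) := by
  have hna : ¬ ('\\' ∈ pvAlphanum) := by decide
  simp [pvStepA, hna]

theorem pvStepA_true (acc : List Char) (c : Char) :
    pvStepA (acc, true) c = (acc ++ [c], false) := by
  simp only [pvStepA]
  split_ifs <;> rfl

-- Combined loop invariant: from flag=false A's loop produces acc ++ pvScanB l;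
-- from flag=true it first emits the next character unconditionally, then continues as flag=false.
theorem pvFoldA_eq (l : List Char) :
    (∀ acc, (l.foldl pvStepA (acc, false)).1 = acc ++ pvScanB l) ∧
    (∀ acc, (l.foldl pvStepA (acc, true)).1 =
      acc ++ (match l with | [] => [] | c :: r => c :: pvScanB r)) := by
  induction l with
  | nil => simp [pvScanB]
  | cons c rest ih =>
    constructor
    · intro acc
      by_cases hb : c = '\\'
      · subst hb
        rw [List.foldl_cons, pvStepA_false_bs, ih.2 acc, pvScanB_cons_bs]
      · rw [List.foldl_cons, pvStepA_false_ne hb, ih.1 (acc ++ [c]),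
          pvScanB_cons_ne hb]
        simp
    · intro acc
      rw [List.foldl_cons, pvStepA_true, ih.1 (acc ++ [c])]
      simp

-- ===== VERDICT (by name: the statement is the Claim_ definition above) =====
theorem re_unescape_spec : Claim_equal_re_unescape := by
  intro pattern _
  show _ = _
  unfold re_unescape re_unescape_alt
  rw [(pvFoldA_eq pattern.toList).1 []]
  simp
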